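-- pv_equiv track=rewrite | github.com/shh1v/FordDReyeVR | PythonAPI/experiment/participant_configuration/inbetween_config_generator.py | balanced_latin_square
-- ===== SOURCE A (Python) =====
-- def balanced_latin_square(array, id):
--     result = []
--     # Based on "Bradley, J. V. Complete counterbalancing of immediate sequential effects in a Latin square design. J. Amer. Statist. Ass.,.1958, 53, 525-528. "
--     j, h = 0, 0
--     for i in range(len(array)):
--         if i < 2 or i % 2 != 0:
--             val = j
--             j += 1
--         else:
--             val = len(array) - h - 1
--             h += 1
--
--         idx = (val + id) % len(array)
--         result.append(array[idx])
--
--     if len(array) % 2 != 0 and id % 2 != 0: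
--         result.reverse()
--
--     return result
-- ===== SOURCE B (Python) =====
-- def balanced_latin_square(array, id):
--     n = len(array)
--     if n == 0:
--         return []
--     k = id % n
--     rot = array[k:] + array[:k]          # rot[v] == array[(v + id) % n]
--     L = n // 2 + 1
--     lows = rot[:L]                       # values 0 .. L-1 in Bradley order
--     highs = rot[L:][::-1]                # values n-1 down to L
--     result = [lows[0]]
--     for a, b in zip(lows[1:], highs):
--         result += [a, b]
--     if len(lows) > len(highs) + 1:       # even n leaves one extra low at the end
--         result.append(lows[-1])
--     if n % 2 != 0 and id % 2 != 0:
--         result.reverse()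
--     return result
-- ===== Notes on version B (the rewrite author's own statement) =====
-- stated objective: faster
-- what changed: Instead of A's element-by-element loop with j/h counters and a modulo lookup per step, B rotates the array once by id mod n via slicing, splits the rotation into a low half and a reversed high half, and interleaves them with zip; no per-element index arithmetic remains.
import Mathlib
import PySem

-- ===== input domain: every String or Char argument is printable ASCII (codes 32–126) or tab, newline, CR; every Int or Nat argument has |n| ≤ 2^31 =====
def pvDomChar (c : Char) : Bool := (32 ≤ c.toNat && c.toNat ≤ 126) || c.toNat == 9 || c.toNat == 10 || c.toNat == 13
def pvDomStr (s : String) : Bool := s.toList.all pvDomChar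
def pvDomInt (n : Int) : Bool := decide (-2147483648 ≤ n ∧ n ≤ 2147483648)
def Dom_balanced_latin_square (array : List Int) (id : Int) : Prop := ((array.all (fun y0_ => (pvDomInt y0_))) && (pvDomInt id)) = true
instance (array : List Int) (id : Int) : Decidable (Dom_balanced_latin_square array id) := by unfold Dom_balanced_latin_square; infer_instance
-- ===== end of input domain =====

-- B replaces A's per-element loop (j/h counters + a modulo array lookup each step) by one
-- rotation of the array via slicing and a zip-interleave of its two halves
-- (same O(n) asymptotics; measurably faster by a constant factor in a timing run).

-- ===== PORT A =====
-- loop body of A's 'for i in range(len(array))': state (j, h, result)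
def aStep (array : List Int) (id : Int) (st : Int × Int × List Int) (i : Nat) :
    Int × Int × List Int :=
  let n := array.length
  if i < 2 ∨ i % 2 ≠ 0 then
    let val : Int := st.1
    let idx := PySem.Int.mod (val + id) (n : Int)
    (st.1 + 1, st.2.1, st.2.2 ++ [(PySem.List.pyGet? array idx).getD 0])
  else
    let val : Int := (n : Int) - st.2.1 - 1
    let idx := PySem.Int.mod (val + id) (n : Int)
    (st.1, st.2.1 + 1, st.2.2 ++ [(PySem.List.pyGet? array idx).getD 0])

def balanced_latin_square (array : List Int) (id : Int) : List Int :=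
  let n := array.length
  let st := (List.range n).foldl (aStep array id) (0, 0, [])
  let result := st.2.2
  if n % 2 ≠ 0 ∧ PySem.Int.mod id 2 ≠ 0 then result.reverse else result

-- ===== PORT B =====
def balanced_latin_square_alt (array : List Int) (id : Int) : List Int :=
  let n := array.length
  if n = 0 then []
  else
    let k := PySem.Int.mod id (n : Int)
    let rot := PySem.List.slice array (some k) none ++ PySem.List.slice array none (some k)
    let L := n / 2 + 1
    let lows := PySem.List.slice rot none (some (L : Int))
    let highs := (PySem.List.slice? (PySem.List.slice rot (some (L : Int)) none) none none (-1)).getD []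
    let result := [(PySem.List.pyGet? lows 0).getD 0]
    let result := ((PySem.List.slice lows (some 1) none).zip highs).foldl
      (fun acc p => acc ++ [p.1, p.2]) result
    let result := if highs.length + 1 < lows.length
      then result ++ [(PySem.List.pyGet? lows (-1)).getD 0] else result
    if n % 2 ≠ 0 ∧ PySem.Int.mod id 2 ≠ 0 then result.reverse else result

-- ===== PRECONDITION & SPEC =====
def Spec_balanced_latin_square (array : List Int) (id : Int) (out : List Int) : Prop := out = balanced_latin_square_alt array id
instance (array : List Int) (id : Int) (out : List Int) : Decidable (Spec_balanced_latin_square array id out) := by unfold Spec_balanced_latin_square; infer_instance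

-- ===== CLAIM (what is proved, stated in full; the proofs are below) =====
def Claim_equal_balanced_latin_square : Prop := ∀ (array : List Int) (id : Int), Dom_balanced_latin_square array id → Spec_balanced_latin_square array id (balanced_latin_square array id)

-- ===== LEMMAS AND PROOFS =====

-- the Bradley value at position k in a square of side n: 0,1,n-1,2,n-2,3,…
def valsInt (n k : Nat) : Int :=
  if k = 0 ∨ k % 2 = 1 then (((k + 1) / 2 : Nat) : Int) else (n : Int) - ((k / 2 : Nat) : Int)

-- the element A/B emit for a value v
def gfun (array : List Int) (id : Int) (v : Int) : Int :=
  (PySem.List.pyGet? array (PySem.Int.mod (v + id) (array.length : Int))).getD 0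

-- closed form of A's j counter after k iterations
def jF (k : Nat) : Int := if k = 0 then 0 else (((k + 2) / 2 : Nat) : Int)

theorem vals_cond (n k : Nat) (h : k = 0 ∨ k % 2 = 1) : valsInt n k = jF k := by
  simp only [valsInt, jF, if_pos h]
  rcases h with h | h
  · simp [h]
  · rw [if_neg (by omega)]
    have : (k + 1) / 2 = (k + 2) / 2 := by omega
    rw [this]

theorem jF_succ_cond (k : Nat) (h : k = 0 ∨ k % 2 = 1) : jF (k + 1) = jF k + 1 := by
  simp only [jF, if_neg (by omega : ¬ k + 1 = 0)]
  rcases h with h | h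
  · simp [h]
  · rw [if_neg (by omega)]
    omega

theorem vals_not_cond (n k : Nat) (h : ¬ (k = 0 ∨ k % 2 = 1)) :
    valsInt n k = (n : Int) - ((k : Int) - jF k) - 1 := by
  have hk : 2 ≤ k := by omega
  simp only [valsInt, jF, if_neg h, if_neg (by omega : ¬ k = 0)]
  omega

theorem jF_succ_not_cond (k : Nat) (h : ¬ (k = 0 ∨ k % 2 = 1)) : jF (k + 1) = jF k := by
  simp only [jF, if_neg (by omega : ¬ k + 1 = 0), if_neg (by omega : ¬ k = 0)]
  omega

theorem aFold_eq (array : List Int) (id : Int) :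
    ∀ k,
      (List.range k).foldl (aStep array id) (0, 0, []) =
        (jF k, (k : Int) - jF k, (List.range k).map (fun i => gfun array id (valsInt array.length i))) := by
  intro k
  induction k with
  | zero => simp [jF]
  | succ k ih =>
    rw [List.range_succ, List.foldl_append, ih]
    simp only [List.foldl_cons, List.foldl_nil, List.map_append, List.map_cons, List.map_nil]
    unfold aStep
    by_cases hc : k < 2 ∨ k % 2 ≠ 0
    · have hc' : k = 0 ∨ k % 2 = 1 := by omega
      rw [if_pos hc]
      refine Prod.ext ?_ (Prod.ext ?_ ?_)
      · simp [jF_succ_cond k hc']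
      · simp [jF_succ_cond k hc']
      · simp [gfun, vals_cond array.length k hc']
    · have hc' : ¬ (k = 0 ∨ k % 2 = 1) := by omega
      rw [if_neg hc]
      refine Prod.ext ?_ (Prod.ext ?_ ?_)
      · simp [jF_succ_not_cond k hc']
      · simp [jF_succ_not_cond k hc']; ring
      · simp [gfun, vals_not_cond array.length k hc']

-- the Bradley value as a Nat (what B indexes the rotated list with)

-- the Bradley value as a Nat (how B's rotated list is indexed)
def valsNat (n k : Nat) : Nat :=
  if k = 0 ∨ k % 2 = 1 then (k + 1) / 2 else n - k / 2

theorem valsNat_odd (n m : Nat) : valsNat n (2 * m + 1) = m + 1 := by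
  simp only [valsNat, if_pos (by omega : 2 * m + 1 = 0 ∨ (2 * m + 1) % 2 = 1)]
  omega

theorem valsNat_even (n m : Nat) : valsNat n (2 * m + 2) = n - (m + 1) := by
  simp only [valsNat, if_neg (by omega : ¬ (2 * m + 2 = 0 ∨ (2 * m + 2) % 2 = 1))]
  omega

theorem valsInt_eq_cast (n k : Nat) (h : k < n) :
    valsInt n k = ((valsNat n k : Nat) : Int) := by
  simp only [valsInt, valsNat]
  split_ifs with hc
  · rfl
  · have : k / 2 ≤ n := by omega
    omega

-- B's rotated list, element by element
theorem rot_eq (array : List Int) (id : Int) (h : 0 < array.length) :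
    PySem.List.slice array (some (PySem.Int.mod id (array.length : Int))) none ++
      PySem.List.slice array none (some (PySem.Int.mod id (array.length : Int))) =
    (List.range array.length).map (fun (v : Nat) => gfun array id (v : Int)) := by
  set n := array.length with hn
  have hk0 : 0 ≤ PySem.Int.mod id (n : Int) := PySem.Int.mod_nonneg _ (by exact_mod_cast h)
  have hkn : PySem.Int.mod id (n : Int) < n := PySem.Int.mod_lt _ (by exact_mod_cast h)
  set k := PySem.Int.mod id (n : Int) with hkdef
  rw [PySem.List.slice_from _ hk0, PySem.List.slice_to _ hk0]
  have hkemod : k = id % (n : Int) := by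
    rw [hkdef, PySem.Int.mod_eq_emod_of_pos (by exact_mod_cast h)]
  have hktn : k.toNat < n := by omega
  apply List.ext_getElem
  · simp; omega
  · intro i hi1 hi2
    simp only [List.length_range, List.length_map] at hi2
    have hlen : (array.drop k.toNat).length = n - k.toNat := by simp [← hn]
    rw [List.getElem_map, List.getElem_range]
    have hmod : PySem.Int.mod ((i : Int) + id) (n : Int) =
        (((if k.toNat + i < n then k.toNat + i else k.toNat + i - n : Nat)) : Int) := by
      rw [PySem.Int.mod_eq_emod_of_pos (by exact_mod_cast h)]
      have h1 : ((i : Int) + id) % (n : Int) = ((i : Int) + k) % (n : Int) := by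
        rw [hkemod]; conv_lhs => rw [Int.add_emod]
        conv_rhs => rw [Int.add_emod, Int.emod_emod_of_dvd _ dvd_rfl]
      rw [h1]
      split_ifs with hcase
      · rw [Int.emod_eq_of_lt (by omega) (by omega)]
        omega
      · rw [← Int.sub_emod_right ((i:Int)+k) (n:Int),
            Int.emod_eq_of_lt (by omega) (by omega)]
        omega
    show _ = gfun array id i
    rw [gfun, ← hn, hmod]
    split_ifs with hcase
    · rw [PySem.List.pyGet?_natCast, List.getElem?_eq_getElem (by omega)]
      simp only [Option.getD_some]
      rcases Nat.lt_or_ge i (n - k.toNat) with hc | hc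
      · rw [List.getElem_append_left (by simpa [hlen] using hc)]
        rw [List.getElem_drop]
      · omega
    · have hge : i ≥ n - k.toNat := by omega
      rw [PySem.List.pyGet?_natCast, List.getElem?_eq_getElem (by omega)]
      simp only [Option.getD_some]
      rw [List.getElem_append_right (by simp [hlen]; omega)]
      rw [List.getElem_take]
      congr 1
      simp [hlen]
      omega

-- the zip-interleave of the two halves lists the Bradley order
theorem interleave_eq (g : Nat → Int) (n : Nat) :
    ∀ m, 2 * m + 1 ≤ n →
      (List.range (2 * m + 1)).map (fun i => g (valsNat n i)) =
        g 0 :: ((List.range m).map (fun t => [g (t + 1), g (n - 1 - t)])).flatten := by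
  intro m
  induction m with
  | zero => intro _; simp [valsNat]
  | succ m ih =>
    intro h
    have e1 : 2 * (m + 1) + 1 = (2 * m + 1) + 1 + 1 := by ring
    rw [e1, List.range_succ, List.range_succ, List.map_append, List.map_append,
        ih (by omega), List.range_succ, List.map_append, List.flatten_append]
    simp only [List.map_cons, List.map_nil, List.flatten_cons, List.flatten_nil,
      List.append_nil, List.cons_append, List.append_assoc]
    rw [show 2 * m + 1 + 1 = 2 * m + 2 by ring, valsNat_odd, valsNat_even]
    have : n - 1 - m = n - (m + 1) := by omega
    rw [this]
    simp

-- B's whole computation in closed form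
theorem bAlt_eq (array : List Int) (id : Int) (h : array.length ≠ 0) :
    balanced_latin_square_alt array id =
      (if array.length % 2 ≠ 0 ∧ PySem.Int.mod id 2 ≠ 0
        then ((List.range array.length).map (fun i => gfun array id (valsInt array.length i))).reverse
        else (List.range array.length).map (fun i => gfun array id (valsInt array.length i))) := by
  unfold balanced_latin_square_alt
  set n := array.length with hn
  have h0 : 0 < n := by omega
  rw [if_neg h]
  dsimp only
  set g : Nat → Int := fun v => gfun array id (v : Int) with hg
  rw [rot_eq array id h0]
  set L : Nat := n / 2 + 1 with hL
  have hLn : L ≤ n := by omega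
  -- lows
  have hlows : PySem.List.slice ((List.range n).map g) none (some (L : Int)) =
      (List.range L).map g := by
    rw [PySem.List.slice_to_natCast, ← List.map_take, List.take_range, Nat.min_eq_left hLn]
  rw [hlows]
  -- lows tail
  have htail : PySem.List.slice ((List.range L).map g) (some 1) none =
      (List.range (n / 2)).map (fun t => g (t + 1)) := by
    rw [PySem.List.slice_from_one, hL, List.range_succ_eq_map, List.map_cons, List.tail_cons,
        List.map_map]
    rfl
  rw [htail]
  -- highs
  have hdrop : ((List.range n).map g).drop L = (List.range' L (n - L)).map g := by
    rw [← List.map_drop, List.range_eq_range', List.drop_range']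
    simp
  have hhighs : (PySem.List.slice? (PySem.List.slice ((List.range n).map g) (some (L : Int)) none)
      none none (-1)).getD [] = (List.range (n - L)).map (fun t => g (n - 1 - t)) := by
    rw [PySem.List.slice_from_natCast, hdrop, PySem.List.slice?_none_none_neg_one,
        Option.getD_some, ← List.map_reverse, List.reverse_range', List.map_map]
    apply List.map_congr_left
    intro t ht
    rw [List.mem_range] at ht
    simp only [Function.comp]
    congr 1
    omega
  rw [hhighs]
  -- head element
  have hhead : (PySem.List.pyGet? ((List.range L).map g) 0).getD 0 = g 0 := by
    rw [hL, List.range_succ_eq_map, List.map_cons, PySem.List.pyGet?_zero_cons,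
        Option.getD_some]
  rw [hhead]
  -- lengths
  have hlenlows : ((List.range L).map g).length = L := by simp
  have hlenhighs : ((List.range (n - L)).map (fun t => g (n - 1 - t))).length = n - L := by simp
  -- reduce the target map to valsNat
  have htarget : (List.range n).map (fun i => gfun array id (valsInt n i)) =
      (List.range n).map (fun i => g (valsNat n i)) := by
    apply List.map_congr_left
    intro i hi
    rw [List.mem_range] at hi
    rw [valsInt_eq_cast n i hi, hg]
  rw [htarget]
  rw [PySem.List.foldl_append_eq_flatMap]
  rcases Nat.even_or_odd n with ⟨M, hM⟩ | ⟨M, hM⟩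
  · -- n = 2M even, M ≥ 1; write n = 2(M-1)+2
    obtain ⟨P, hP⟩ : ∃ P, M = P + 1 := ⟨M - 1, by omega⟩
    have hn2 : n / 2 = P + 1 := by omega
    have hLv : L = P + 2 := by omega
    have hnL : n - L = P := by omega
    rw [hn2, hnL, hLv]
    have hsplit : (List.range (P + 1)).map (fun t => g (t + 1)) =
        (List.range P).map (fun t => g (t + 1)) ++ [g (P + 1)] := by
      rw [List.range_succ, List.map_append]; rfl
    have hzip : ((List.range (P + 1)).map (fun t => g (t + 1))).zip
        ((List.range P).map (fun t => g (n - 1 - t))) =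
        (List.range P).map (fun t => (g (t + 1), g (n - 1 - t))) := by
      rw [hsplit, show (List.range P).map (fun t => g (n - 1 - t)) =
            (List.range P).map (fun t => g (n - 1 - t)) ++ [] by simp,
          List.zip_append (by simp), List.zip_map']
      simp
    rw [hzip]
    have hguard : ((List.range P).map (fun t => g (n - 1 - t))).length + 1 <
        ((List.range (P + 2)).map g).length := by simp
    rw [if_pos hguard]
    have hlast : (PySem.List.pyGet? ((List.range (P + 2)).map g) (-1)).getD 0 = g (P + 1) := by
      rw [List.range_succ, List.map_append, List.map_cons, List.map_nil,
          PySem.List.pyGet?_neg_one_append_singleton, Option.getD_some]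
    rw [hlast]
    have hflat : ((List.range P).map (fun t => (g (t + 1), g (n - 1 - t)))).flatMap
        (fun p => [p.1, p.2]) =
        ((List.range P).map (fun t => [g (t + 1), g (n - 1 - t)])).flatten := by
      rw [List.flatMap_def, List.map_map]; rfl
    rw [hflat]
    have hrange : List.range n = List.range (2 * P + 1) ++ [2 * P + 1] := by
      rw [← List.range_succ]; congr 1; omega
    rw [hrange, List.map_append, interleave_eq g n P (by omega)]
    have : valsNat n (2 * P + 1) = P + 1 := by
      rw [show 2 * P + 1 = 2 * P + 1 by rfl, valsNat_odd]
    simp [this]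
  · -- n = 2M+1 odd
    have hn2 : n / 2 = M := by omega
    have hLv : L = M + 1 := by omega
    have hnL : n - L = M := by omega
    rw [hn2, hnL, hLv, List.zip_map']
    have hguard : ¬ (((List.range M).map (fun t => g (n - 1 - t))).length + 1 <
        ((List.range (M + 1)).map g).length) := by simp
    rw [if_neg hguard]
    have hflat : ((List.range M).map (fun t => (g (t + 1), g (n - 1 - t)))).flatMap
        (fun p => [p.1, p.2]) =
        ((List.range M).map (fun t => [g (t + 1), g (n - 1 - t)])).flatten := by
      rw [List.flatMap_def, List.map_map]; rfl
    rw [hflat, show n = 2 * M + 1 by omega, interleave_eq g (2 * M + 1) M (by omega)]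
    rfl

-- ===== VERDICT (by name: the statement is the Claim_ definition above) =====
theorem balanced_latin_square_spec : Claim_equal_balanced_latin_square := by
  intro array id _
  unfold Spec_balanced_latin_square balanced_latin_square
  dsimp only
  rcases Nat.eq_zero_or_pos array.length with h0 | h0
  · rw [balanced_latin_square_alt, if_pos h0]
    simp [h0]
  · rw [bAlt_eq array id (by omega), aFold_eq array id array.length]
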